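-- pv_equiv track=rewrite | github.com/Illucious/mirrornote | backend/insights_generator.py | generate_filler_insight
-- ===== SOURCE A (Python) =====
-- from typing import Dict, List
--
-- def generate_filler_insight(filler_words: Dict, word_count: int) -> str:
--     """Generate personalized insight about filler words."""
--     if not filler_words:
--         return "You avoided filler words completely—impressive!"
--
--     total_fillers = sum(filler_words.values())
--     filler_rate = (total_fillers / word_count * 100) if word_count > 0 else 0
--
--     # Get most common fillers
--     top_fillers = sorted(filler_words.items(), key=lambda x: x[1], reverse=True)[:2]
--     filler_desc = " and ".join([f"'{k}' {v} times" for k, v in top_fillers])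
--
--     if filler_rate > 5:
--         return f"You said {filler_desc}—that's {total_fillers} total fillers. Try replacing them with brief pauses for a more polished delivery"
--     elif filler_rate > 2:
--         return f"You said {filler_desc}—just a few to work on. Pause instead, and your ideas will have more impact"
--     else:
--         return f"You had minimal filler words ({filler_desc})—well done keeping your speech clean"
-- ===== SOURCE B (Python) =====
-- def generate_filler_insight(filler_words, word_count):
--     """Generate personalized insight about filler words."""
--     if not filler_words:
--         return "You avoided filler words completely—impressive!"
--
--     # One linear pass: accumulate the total and keep the best and second-best
--     # (word, count) pairs; strict comparisons keep the earlier (insertion-order)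
--     # entry on ties, matching a stable descending sort.
--     total_fillers = 0
--     best = None
--     second = None
--     for k, v in filler_words.items():
--         total_fillers += v
--         if best is None or v > best[1]:
--             second = best
--             best = (k, v)
--         elif second is None or v > second[1]:
--             second = (k, v)
--
--     filler_rate = (total_fillers / word_count * 100) if word_count > 0 else 0
--
--     filler_desc = f"'{best[0]}' {best[1]} times"
--     if second is not None:
--         filler_desc += f" and '{second[0]}' {second[1]} times"
--
--     if filler_rate > 5:
--         return f"You said {filler_desc}—that's {total_fillers} total fillers. Try replacing them with brief pauses for a more polished delivery"
--     elif filler_rate > 2: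
--         return f"You said {filler_desc}—just a few to work on. Pause instead, and your ideas will have more impact"
--     else:
--         return f"You had minimal filler words ({filler_desc})—well done keeping your speech clean"
-- ===== Notes on version B (the rewrite author's own statement) =====
-- stated objective: alternative
-- what changed: The sorted(items, key=count, reverse=True)[:2] selection is replaced by a single linear pass that maintains the best and second-best (word, count) pairs (strict comparisons reproduce the stable sort's tie order) while also accumulating the total in the same pass.
import Mathlib
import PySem

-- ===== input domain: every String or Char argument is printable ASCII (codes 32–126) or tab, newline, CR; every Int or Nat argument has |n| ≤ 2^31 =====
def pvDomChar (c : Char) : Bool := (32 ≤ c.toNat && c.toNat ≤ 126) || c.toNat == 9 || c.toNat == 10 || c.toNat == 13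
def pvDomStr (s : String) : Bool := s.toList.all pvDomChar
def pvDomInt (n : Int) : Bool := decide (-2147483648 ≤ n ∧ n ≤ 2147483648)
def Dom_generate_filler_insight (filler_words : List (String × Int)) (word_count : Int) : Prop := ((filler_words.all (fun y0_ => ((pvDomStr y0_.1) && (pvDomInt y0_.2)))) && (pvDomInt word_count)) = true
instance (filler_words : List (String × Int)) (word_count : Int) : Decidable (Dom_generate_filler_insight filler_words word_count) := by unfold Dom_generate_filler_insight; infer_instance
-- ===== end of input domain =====

-- B replaces A's sort-then-slice top-2 selection with a single linear pass that keeps the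
-- best and second-best pairs (objective: alternative decomposition of the same O(n) task,
-- avoiding the sort).


-- ===== PORT A =====
-- f"'{k}' {v} times"
def pvPhrase (kv : String × Int) : String :=
  "'" ++ kv.1 ++ "' " ++ PySem.Int.toStr kv.2 ++ " times"

-- The float comparisons `filler_rate > 5` / `> 2` (filler_rate = total/word_count*100 when
-- word_count > 0, else 0) are ported as exact integer inequalities 100*total > 5*word_count
-- (resp. 2*word_count) under 0 < word_count: for 0 < word_count ≤ 2^31 the nonzero gap of the
-- rational 100*total/word_count from 5 (resp. 2) is at least 2/word_count ≥ 2^-30, far above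
-- the rounding error of the two double operations near those thresholds, so the comparisons
-- coincide exactly on the domain.
def generate_filler_insight (filler_words : List (String × Int)) (word_count : Int) : String :=
  if filler_words = [] then "You avoided filler words completely—impressive!"
  else
    let total_fillers := (filler_words.map (fun kv => kv.2)).sum
    let top_fillers := PySem.List.slice (PySem.List.sorted filler_words (fun x => x.2) true) none (some 2)
    let filler_desc := PySem.Str.join " and " (top_fillers.map pvPhrase)
    if 0 < word_count ∧ 5 * word_count < 100 * total_fillers then
      "You said " ++ filler_desc ++ "—that's " ++ PySem.Int.toStr total_fillers ++ " total fillers. Try replacing them with brief pauses for a more polished delivery"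
    else if 0 < word_count ∧ 2 * word_count < 100 * total_fillers then
      "You said " ++ filler_desc ++ "—just a few to work on. Pause instead, and your ideas will have more impact"
    else
      "You had minimal filler words (" ++ filler_desc ++ ")—well done keeping your speech clean"

-- ===== PORT B =====
-- one step of B's single pass: add to the total, update best/second with strict comparisons
def pvStepB (st : Int × Option (String × Int) × Option (String × Int)) (kv : String × Int) :
    Int × Option (String × Int) × Option (String × Int) :=
  match st with
  | (total, best, second) =>
    let total := total + kv.2
    match best with
    | none => (total, some kv, second)
    | some b =>
      if b.2 < kv.2 then (total, some kv, some b)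
      else
        match second with
        | none => (total, some b, some kv)
        | some s => if s.2 < kv.2 then (total, some b, some kv) else (total, some b, some s)

-- same exact-integer port of the float threshold comparisons as in port A (see comment there)
def generate_filler_insight_alt (filler_words : List (String × Int)) (word_count : Int) : String :=
  if filler_words = [] then "You avoided filler words completely—impressive!"
  else
    let st := filler_words.foldl pvStepB (0, none, none)
    let total_fillers := st.1
    let filler_desc :=
      (match st.2.1 with
       | none => ""
       | some b => pvPhrase b)
      ++ (match st.2.2 with
          | none => ""
          | some s => " and " ++ pvPhrase s)
    if 0 < word_count ∧ 5 * word_count < 100 * total_fillers then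
      "You said " ++ filler_desc ++ "—that's " ++ PySem.Int.toStr total_fillers ++ " total fillers. Try replacing them with brief pauses for a more polished delivery"
    else if 0 < word_count ∧ 2 * word_count < 100 * total_fillers then
      "You said " ++ filler_desc ++ "—just a few to work on. Pause instead, and your ideas will have more impact"
    else
      "You had minimal filler words (" ++ filler_desc ++ ")—well done keeping your speech clean"

-- ===== PRECONDITION & SPEC =====
def Spec_generate_filler_insight (filler_words : List (String × Int)) (word_count : Int) (out : String) : Prop := out = generate_filler_insight_alt filler_words word_count
instance (filler_words : List (String × Int)) (word_count : Int) (out : String) : Decidable (Spec_generate_filler_insight filler_words word_count out) := by unfold Spec_generate_filler_insight; infer_instance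

-- ===== CLAIM (what is proved, stated in full; the proofs are below) =====
def Claim_equal_generate_filler_insight : Prop := ∀ (filler_words : List (String × Int)) (word_count : Int), Dom_generate_filler_insight filler_words word_count → Spec_generate_filler_insight filler_words word_count (generate_filler_insight filler_words word_count)

-- ===== LEMMAS AND PROOFS =====

-- A's insertion step (stable descending sort, via PySem.List.sorted_rev_eq_foldl_insertBy)
def pvIns (x : String × Int) (acc : List (String × Int)) : List (String × Int) :=
  PySem.List.insertBy (fun a b => decide (b.2 < a.2)) x acc

-- one step: B's best/second update is exactly the first two entries after insertion
lemma pvStepB_heads (t : Int) (x : String × Int) (acc : List (String × Int)) :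
    pvStepB (t, acc[0]?, acc[1]?) x = (t + x.2, (pvIns x acc)[0]?, (pvIns x acc)[1]?) := by
  match acc with
  | [] => simp [pvStepB, pvIns, PySem.List.insertBy]
  | [a] =>
    by_cases h : a.2 < x.2 <;>
      simp [pvStepB, pvIns, PySem.List.insertBy, h]
  | a :: b :: rest =>
    by_cases h : a.2 < x.2
    · simp [pvStepB, pvIns, PySem.List.insertBy, h]
    · by_cases h2 : b.2 < x.2 <;>
        simp [pvStepB, pvIns, PySem.List.insertBy, h, h2]

-- the fold invariant: B's state is (running total, first two entries of A's insertion fold)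
lemma pvFold_inv (xs : List (String × Int)) (acc : List (String × Int)) (t : Int) :
    xs.foldl pvStepB (t, acc[0]?, acc[1]?) =
      (t + (xs.map (fun kv => kv.2)).sum,
       (xs.foldl (fun a x => pvIns x a) acc)[0]?,
       (xs.foldl (fun a x => pvIns x a) acc)[1]?) := by
  induction xs generalizing acc t with
  | nil => simp
  | cons x xs ih =>
    simp only [List.foldl_cons, pvStepB_heads, List.map_cons, List.sum_cons]
    rw [ih (pvIns x acc) (t + x.2)]
    ring_nf

lemma pvJoin_one (a : String) : PySem.Str.join " and " [a] = a := by
  apply String.toList_injective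
  simp [PySem.Str.join, PySem.Chars.join, List.intercalate]

lemma pvJoin_two (a b : String) :
    PySem.Str.join " and " [a, b] = a ++ (" and " ++ b) := by
  apply String.toList_injective
  simp [PySem.Str.join, PySem.Chars.join, List.intercalate]

-- ===== VERDICT (by name: the statement is the Claim_ definition above) =====
theorem generate_filler_insight_spec : Claim_equal_generate_filler_insight := by
  intro fw wc _
  unfold Spec_generate_filler_insight generate_filler_insight generate_filler_insight_alt
  by_cases hfw : fw = []
  · simp [hfw]
  · simp only [hfw, if_false]
    have hsorted : PySem.List.sorted fw (fun x => x.2) true = fw.foldl (fun a x => pvIns x a) [] := by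
      simpa [pvIns] using PySem.List.sorted_rev_eq_foldl_insertBy fw (fun x => x.2)
    have hst : fw.foldl pvStepB (0, none, none) =
        ((fw.map (fun kv => kv.2)).sum,
         (PySem.List.sorted fw (fun x => x.2) true)[0]?,
         (PySem.List.sorted fw (fun x => x.2) true)[1]?) := by
      have := pvFold_inv fw [] 0
      simpa [hsorted] using this
    rw [hst]
    have hnil : PySem.List.sorted fw (fun x => x.2) true ≠ [] := by
      simp [PySem.List.sorted_eq_nil_iff, hfw]
    have hslice : PySem.List.slice (PySem.List.sorted fw (fun x => x.2) true) none (some 2) =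
        (PySem.List.sorted fw (fun x => x.2) true).take 2 := by
      rw [PySem.List.slice_to] <;> simp
    rw [hslice]
    -- case on the shape of the sorted list to compute both descriptions
    match hS : PySem.List.sorted fw (fun x => x.2) true with
    | [] => exact absurd hS hnil
    | [a] => simp [pvJoin_one]
    | a :: b :: rest => simp [pvJoin_two]
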